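-- pv_equiv track=rewrite | github.com/Escanor4323/ai-Puzzle-Solver-backend | game/elo_system.py | get_maze_generation_params
-- ===== SOURCE A (Python) =====
-- def get_maze_generation_params(
--     player_elo: int,
-- ) -> dict[str, object]:
--     """Map player Elo to maze generation parameters.
--
--     Delegates to the canonical ``elo_to_size`` brackets defined
--     in ``game.engine.GameEngine.start_maze``.
--
--     Parameters
--     ----------
--     player_elo : int
--         Player's Elo rating for the maze category.
--
--     Returns
--     -------
--     dict
--         Parameters compatible with MazeGenerationParams.
--     """
--     # Single source of truth — matches GameEngine.start_maze
--     elo_to_size = {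
--         (0, 1000): (7, 7, 1, 0, 0),       # Easy
--         (1000, 1200): (10, 10, 4, 1, 0),   # Medium
--         (1200, 1400): (14, 14, 6, 2, 1),   # Hard
--         (1400, 1600): (20, 20, None, 3, 2), # Expert
--         (1600, 9999): (25, 25, None, 5, 3), # Master
--     }
--     width, height, max_dead, num_rules, num_keys = (
--         10, 10, 4, 0, 0,
--     )
--     for (lo, hi), (w, h, md, nr, nk) in elo_to_size.items():
--         if lo <= player_elo < hi:
--             width, height, max_dead, num_rules, num_keys = (
--                 w, h, md, nr, nk,
--             )
--             break
--
--     return {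
--         "width": width,
--         "height": height,
--         "max_dead_end_depth": max_dead,
--         "num_logic_rules": num_rules,
--         "num_keys": num_keys,
--         "target_elo": player_elo,
--     }
-- ===== SOURCE B (Python) =====
-- def _bisect_right(a, x):
--     """Rightmost insertion point for x in sorted list a."""
--     lo, hi = 0, len(a)
--     while lo < hi:
--         mid = (lo + hi) // 2
--         if x < a[mid]:
--             hi = mid
--         else:
--             lo = mid + 1
--     return lo
--
--
-- def get_maze_generation_params(player_elo: int) -> dict[str, object]:
--     """Map player Elo to maze generation parameters.
--
--     The difficulty brackets are the half-open intervals between consecutive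
--     thresholds; table[i] holds the parameters for [thresholds[i],
--     thresholds[i+1]).  An Elo outside the covered range gets the defaults.
--     """
--     thresholds = [0, 1000, 1200, 1400, 1600, 9999]
--     table = [
--         (7, 7, 1, 0, 0),        # Easy
--         (10, 10, 4, 1, 0),      # Medium
--         (14, 14, 6, 2, 1),      # Hard
--         (20, 20, None, 3, 2),   # Expert
--         (25, 25, None, 5, 3),   # Master
--     ]
--     i = _bisect_right(thresholds, player_elo) - 1
--     if 0 <= i < len(table):
--         w, h, md, nr, nk = table[i]
--     else:
--         w, h, md, nr, nk = (10, 10, 4, 0, 0)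
--     return {
--         "width": w,
--         "height": h,
--         "max_dead_end_depth": md,
--         "num_logic_rules": nr,
--         "num_keys": nk,
--         "target_elo": player_elo,
--     }
-- ===== Notes on version B (the rewrite author's own statement) =====
-- stated objective: alternative
-- what changed: Replaces the linear scan over a (lo,hi)-keyed bracket dict with a binary search over a sorted threshold list indexing a parallel parameter table, falling back to the defaults whenever the index lands outside the table.
import Mathlib
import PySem

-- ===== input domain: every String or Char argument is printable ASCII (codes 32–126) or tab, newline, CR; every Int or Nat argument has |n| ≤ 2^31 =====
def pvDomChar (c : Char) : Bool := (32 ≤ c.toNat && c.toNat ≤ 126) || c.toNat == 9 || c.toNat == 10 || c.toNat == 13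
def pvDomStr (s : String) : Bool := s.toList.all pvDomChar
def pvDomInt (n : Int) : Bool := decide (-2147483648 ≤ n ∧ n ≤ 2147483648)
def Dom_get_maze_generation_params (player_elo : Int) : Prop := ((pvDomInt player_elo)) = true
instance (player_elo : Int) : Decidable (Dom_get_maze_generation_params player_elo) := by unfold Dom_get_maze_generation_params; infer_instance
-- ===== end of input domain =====

-- B replaces A's linear scan over a bracket dict by a binary search over a sorted
-- threshold list indexing a parallel parameter table (alternative structure, same values).

-- ===== PORT A =====
-- A's loop over elo_to_size.items() with break: first matching bracket wins.
def pvScanA (player_elo : Int) (entries : List ((Int × Int) × (Int × Int × Option Int × Int × Int)))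
    (acc : Int × Int × Option Int × Int × Int) : Int × Int × Option Int × Int × Int :=
  match entries with
  | [] => acc
  | ((lo, hi), t) :: rest =>
      if lo ≤ player_elo ∧ player_elo < hi then t
      else pvScanA player_elo rest acc

def get_maze_generation_params (player_elo : Int) : List (String × Option Int) :=
  let elo_to_size : List ((Int × Int) × (Int × Int × Option Int × Int × Int)) :=
    [((0, 1000), (7, 7, some 1, 0, 0)),
     ((1000, 1200), (10, 10, some 4, 1, 0)),
     ((1200, 1400), (14, 14, some 6, 2, 1)),
     ((1400, 1600), (20, 20, none, 3, 2)),
     ((1600, 9999), (25, 25, none, 5, 3))]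
  let r := pvScanA player_elo elo_to_size (10, 10, some 4, 0, 0)
  [("width", some r.1), ("height", some r.2.1), ("max_dead_end_depth", r.2.2.1),
   ("num_logic_rules", some r.2.2.2.1), ("num_keys", some r.2.2.2.2), ("target_elo", some player_elo)]

-- ===== PORT B =====
-- hand-written bisect_right from Source B: binary search on lo/hi indices
def pvBisectRight (a : List Int) (x : Int) (lo hi : Nat) : Nat :=
  if h : lo < hi then
    let mid := (lo + hi) / 2
    if x < a.getD mid 0 then pvBisectRight a x lo mid
    else pvBisectRight a x (mid + 1) hi
  else lo
termination_by hi - lo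
decreasing_by all_goals omega

def get_maze_generation_params_alt (player_elo : Int) : List (String × Option Int) :=
  let thresholds : List Int := [0, 1000, 1200, 1400, 1600, 9999]
  let table : List (Int × Int × Option Int × Int × Int) :=
    [(7, 7, some 1, 0, 0), (10, 10, some 4, 1, 0), (14, 14, some 6, 2, 1),
     (20, 20, none, 3, 2), (25, 25, none, 5, 3)]
  let i : Int := (pvBisectRight thresholds player_elo 0 thresholds.length : Int) - 1
  let r : Int × Int × Option Int × Int × Int :=
    if 0 ≤ i ∧ i < (table.length : Int) then table.getD i.toNat (0, 0, none, 0, 0)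
    else (10, 10, some 4, 0, 0)
  [("width", some r.1), ("height", some r.2.1), ("max_dead_end_depth", r.2.2.1),
   ("num_logic_rules", some r.2.2.2.1), ("num_keys", some r.2.2.2.2), ("target_elo", some player_elo)]

-- ===== PRECONDITION & SPEC =====
def Spec_get_maze_generation_params (player_elo : Int) (out : List (String × Option Int)) : Prop := out = get_maze_generation_params_alt player_elo
instance (player_elo : Int) (out : List (String × Option Int)) : Decidable (Spec_get_maze_generation_params player_elo out) := by unfold Spec_get_maze_generation_params; infer_instance

-- ===== CLAIM =====
def Claim_equal_get_maze_generation_params : Prop := ∀ (player_elo : Int), Dom_get_maze_generation_params player_elo → Spec_get_maze_generation_params player_elo (get_maze_generation_params player_elo)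

-- ===== LEMMAS AND PROOFS =====

lemma pvBR_step (a : List Int) (x : Int) (lo hi : Nat) (h : lo < hi) :
    pvBisectRight a x lo hi =
      if x < a.getD ((lo + hi) / 2) 0 then pvBisectRight a x lo ((lo + hi) / 2)
      else pvBisectRight a x ((lo + hi) / 2 + 1) hi := by
  rw [pvBisectRight]; simp [h]

lemma pvBR_base (a : List Int) (x : Int) (lo hi : Nat) (h : ¬ lo < hi) :
    pvBisectRight a x lo hi = lo := by
  rw [pvBisectRight]; simp [h]

-- unfold the 6-threshold binary search completely for an arbitrary x
lemma pvBisectRight_six (x : Int) :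
    pvBisectRight [0, 1000, 1200, 1400, 1600, 9999] x 0 6 =
      if x < 1400 then
        (if x < 1000 then (if x < 0 then 0 else 1) else (if x < 1200 then 2 else 3))
      else
        (if x < 9999 then (if x < 1600 then 4 else 5) else 6) := by
  rw [pvBR_step _ x 0 6 (by norm_num)]; norm_num [List.getD]
  rw [pvBR_step _ x 0 3 (by norm_num), pvBR_step _ x 4 6 (by norm_num)]; norm_num [List.getD]
  rw [pvBR_step _ x 0 1 (by norm_num), pvBR_step _ x 2 3 (by norm_num),
      pvBR_step _ x 4 5 (by norm_num), pvBR_base _ x 6 6 (by norm_num)]; norm_num [List.getD]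
  rw [pvBR_base _ x 0 0 (by norm_num), pvBR_base _ x 1 1 (by norm_num),
      pvBR_base _ x 2 2 (by norm_num), pvBR_base _ x 3 3 (by norm_num),
      pvBR_base _ x 4 4 (by norm_num), pvBR_base _ x 5 5 (by norm_num)]

-- ===== VERDICT =====
set_option maxHeartbeats 2000000 in
theorem get_maze_generation_params_spec : Claim_equal_get_maze_generation_params := by
  intro e _
  unfold Spec_get_maze_generation_params
  simp only [get_maze_generation_params, get_maze_generation_params_alt,
    List.length_cons, List.length_nil, Nat.reduceAdd, pvBisectRight_six, pvScanA]
  split_ifs <;> first | rfl | omega
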